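-- pv_equiv track=rewrite | github.com/HongyuanZhang01/WELS-Translator-AI | pipeline/improver.py | find_glossary_regressions
-- ===== SOURCE A (Python) =====
-- def find_glossary_regressions(original_text, improved_text, glossary):
--     """
--     Compares the original and improved texts to find glossary terms that
--     were PRESENT in the original but DISAPPEARED in the improved version.
--     These are regressions — the improver broke something that was working.
--
--     Returns:
--       list of dicts: [{source_term, target_term, issue}]
--     """
--     if not glossary:
--         return []
--
--     regressions = []
--     for source_term, target_term in glossary.items():
--         if not target_term:
--             continue
--         was_present = target_term in original_text
--         still_present = target_term in improved_text
--         if was_present and not still_present: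
--             regressions.append({
--                 "source_term": source_term,
--                 "target_term": target_term,
--                 "issue": f"Glossary term '{target_term}' (for '{source_term}') "
--                          f"was present in the original but disappeared after improvement"
--             })
--
--     return regressions
-- ===== SOURCE B (Python) =====
-- def find_glossary_regressions(original_text, improved_text, glossary):
--     """
--     Same result as A, computed by substring indexing: collect the distinct
--     lengths of the (non-empty) glossary target terms, build for each text the
--     set of ALL its substrings of those lengths in one sweep per length, and
--     then decide presence of every term by two O(1) set lookups instead of a
--     full-text scan per term.
--     """
--     lengths = {len(t) for t in glossary.values() if t}
--
--     def substring_index(text):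
--         subs = set()
--         for L in lengths:
--             for i in range(len(text) - L + 1):
--                 subs.add(text[i:i + L])
--         return subs
--
--     orig_subs = substring_index(original_text)
--     impr_subs = substring_index(improved_text)
--
--     return [
--         {
--             "source_term": source_term,
--             "target_term": target_term,
--             "issue": f"Glossary term '{target_term}' (for '{source_term}') "
--                      f"was present in the original but disappeared after improvement",
--         }
--         for source_term, target_term in glossary.items()
--         if target_term and target_term in orig_subs and target_term not in impr_subs
--     ]
-- ===== Notes on version B (the rewrite author's own statement) =====
-- stated objective: faster
-- what changed: Replaced the per-term substring scan of both texts (one 'in' search per glossary term per text) by a substring index: one pass per distinct term length over each text builds a hash set of all substrings of those lengths, after which every term's presence is two O(1) set lookups.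
import Mathlib
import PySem

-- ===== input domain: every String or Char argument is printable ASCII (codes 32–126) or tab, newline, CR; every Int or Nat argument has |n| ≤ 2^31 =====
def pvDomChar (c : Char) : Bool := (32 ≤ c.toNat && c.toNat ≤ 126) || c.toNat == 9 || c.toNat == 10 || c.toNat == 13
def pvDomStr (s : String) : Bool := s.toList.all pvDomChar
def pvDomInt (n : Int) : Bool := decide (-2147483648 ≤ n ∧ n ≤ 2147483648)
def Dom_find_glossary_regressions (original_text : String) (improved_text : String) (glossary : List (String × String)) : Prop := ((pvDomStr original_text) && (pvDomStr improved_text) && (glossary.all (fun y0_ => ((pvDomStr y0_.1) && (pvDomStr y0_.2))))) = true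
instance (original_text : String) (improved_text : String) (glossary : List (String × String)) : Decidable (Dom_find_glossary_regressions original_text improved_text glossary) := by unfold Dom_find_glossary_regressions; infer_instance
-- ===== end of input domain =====

-- B replaces A's per-term 'in' scan of both texts by a substring index (a set of all
-- substrings of the needed lengths, built once per text); objective: alternative algorithm.

-- shared by both ports: the f-string message and the result dict (identical literals in both Pythons)
def pvIssue (source_term target_term : String) : String :=
  "Glossary term '" ++ target_term ++ "' (for '" ++ source_term ++ "') " ++
  "was present in the original but disappeared after improvement"

def pvEntry (source_term target_term : String) : List (String × String) :=
  [("source_term", source_term), ("target_term", target_term), ("issue", pvIssue source_term target_term)]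

-- ===== PORT A =====
def find_glossary_regressions (original_text : String) (improved_text : String) (glossary : List (String × String)) : List (List (String × String)) :=
  if glossary = [] then []
  else
    glossary.foldl (fun regressions p =>
      if p.2 = "" then regressions
      else
        let was_present := PySem.Str.isIn p.2 original_text
        let still_present := PySem.Str.isIn p.2 improved_text
        if was_present && !still_present then regressions ++ [pvEntry p.1 p.2]
        else regressions) []

-- ===== PORT B =====
-- lengths = {len(t) for t in glossary.values() if t}
def fgrLengths (glossary : List (String × String)) : PySem.Set Int :=
  glossary.foldl (fun acc p => if p.2 = "" then acc else PySem.Set.add acc (PySem.Str.len p.2)) PySem.Set.empty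

-- substring_index(text): all substrings of text whose length is in `lengths`
def fgrSubs (text : String) (lengths : PySem.Set Int) : PySem.Set String :=
  lengths.foldl (fun acc L =>
    (PySem.List.pyRange 0 (PySem.Str.len text - L + 1) 1).foldl
      (fun acc2 i => PySem.Set.add acc2 (PySem.Str.slice text (some i) (some (i + L)))) acc)
    PySem.Set.empty

def find_glossary_regressions_alt (original_text : String) (improved_text : String) (glossary : List (String × String)) : List (List (String × String)) :=
  let lengths := fgrLengths glossary
  let orig_subs := fgrSubs original_text lengths
  let impr_subs := fgrSubs improved_text lengths
  (glossary.filter (fun p =>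
      !(p.2 == "") && (PySem.Set.contains orig_subs p.2 && !PySem.Set.contains impr_subs p.2))).map
    (fun p => pvEntry p.1 p.2)

-- ===== PRECONDITION & SPEC =====
def Spec_find_glossary_regressions (original_text : String) (improved_text : String) (glossary : List (String × String)) (out : List (List (String × String))) : Prop := out = find_glossary_regressions_alt original_text improved_text glossary
instance (original_text : String) (improved_text : String) (glossary : List (String × String)) (out : List (List (String × String))) : Decidable (Spec_find_glossary_regressions original_text improved_text glossary out) := by unfold Spec_find_glossary_regressions; infer_instance

-- ===== CLAIM (what is proved, stated in full; the proofs are below) =====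
def Claim_equal_find_glossary_regressions : Prop := ∀ (original_text : String) (improved_text : String) (glossary : List (String × String)), Dom_find_glossary_regressions original_text improved_text glossary → Spec_find_glossary_regressions original_text improved_text glossary (find_glossary_regressions original_text improved_text glossary)

-- ===== LEMMAS AND PROOFS =====

-- membership in the folded length set
theorem pv_mem_fgrLengths (g : List (String × String)) (init : PySem.Set Int) (x : Int) :
    x ∈ g.foldl (fun acc p => if p.2 = "" then acc else PySem.Set.add acc (PySem.Str.len p.2)) init ↔
      x ∈ init ∨ ∃ p ∈ g, ¬ p.2 = "" ∧ x = PySem.Str.len p.2 := by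
  induction g generalizing init with
  | nil => simp
  | cons q tl ih =>
    simp only [List.foldl_cons]
    by_cases hq : q.2 = ""
    · rw [if_pos hq, ih]
      constructor
      · rintro (h | ⟨p, hp, h1, h2⟩)
        · exact Or.inl h
        · exact Or.inr ⟨p, List.mem_cons_of_mem _ hp, h1, h2⟩
      · rintro (h | ⟨p, hp, h1, h2⟩)
        · exact Or.inl h
        · rcases List.mem_cons.mp hp with rfl | hp'
          · exact absurd hq h1
          · exact Or.inr ⟨p, hp', h1, h2⟩
    · rw [if_neg hq, ih]
      constructor
      · rintro (h | ⟨p, hp, h1, h2⟩)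
        · rcases (PySem.Set.mem_add _ _ _).mp h with h' | rfl
          · exact Or.inl h'
          · exact Or.inr ⟨q, List.mem_cons_self .., hq, rfl⟩
        · exact Or.inr ⟨p, List.mem_cons_of_mem _ hp, h1, h2⟩
      · rintro (h | ⟨p, hp, h1, h2⟩)
        · exact Or.inl ((PySem.Set.mem_add _ _ _).mpr (Or.inl h))
        · rcases List.mem_cons.mp hp with rfl | hp'
          · exact Or.inl ((PySem.Set.mem_add _ _ _).mpr (Or.inr h2))
          · exact Or.inr ⟨p, hp', h1, h2⟩

-- membership in a fold of pure Set.add insertions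
theorem pv_mem_foldl_add {α β : Type} [BEq β] [LawfulBEq β] (l : List α) (f : α → β)
    (init : PySem.Set β) (x : β) :
    x ∈ l.foldl (fun acc a => PySem.Set.add acc (f a)) init ↔ x ∈ init ∨ ∃ a ∈ l, x = f a := by
  induction l generalizing init with
  | nil => simp
  | cons a tl ih =>
    simp only [List.foldl_cons]
    rw [ih]
    constructor
    · rintro (h | ⟨b, hb, h2⟩)
      · rcases (PySem.Set.mem_add _ _ _).mp h with h' | rfl
        · exact Or.inl h'
        · exact Or.inr ⟨a, List.mem_cons_self .., rfl⟩
      · exact Or.inr ⟨b, List.mem_cons_of_mem _ hb, h2⟩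
    · rintro (h | ⟨b, hb, h2⟩)
      · exact Or.inl ((PySem.Set.mem_add _ _ _).mpr (Or.inl h))
      · rcases List.mem_cons.mp hb with rfl | hb'
        · exact Or.inl ((PySem.Set.mem_add _ _ _).mpr (Or.inr h2))
        · exact Or.inr ⟨b, hb', h2⟩

-- membership in the substring index (over an arbitrary length list / initial set)
theorem pv_mem_fgrSubs (text : String) (lengths : List Int) (init : PySem.Set String) (x : String) :
    x ∈ lengths.foldl (fun acc L =>
        (PySem.List.pyRange 0 (PySem.Str.len text - L + 1) 1).foldl
          (fun acc2 i => PySem.Set.add acc2 (PySem.Str.slice text (some i) (some (i + L)))) acc) init ↔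
      x ∈ init ∨ ∃ L ∈ lengths, ∃ i ∈ PySem.List.pyRange 0 (PySem.Str.len text - L + 1) 1,
        x = PySem.Str.slice text (some i) (some (i + L)) := by
  induction lengths generalizing init with
  | nil => simp
  | cons L tl ih =>
    simp only [List.foldl_cons]
    rw [ih, pv_mem_foldl_add]
    constructor
    · rintro ((h | ⟨i, hi, h2⟩) | ⟨L', hL', i, hi, h2⟩)
      · exact Or.inl h
      · exact Or.inr ⟨L, List.mem_cons_self .., i, hi, h2⟩
      · exact Or.inr ⟨L', List.mem_cons_of_mem _ hL', i, hi, h2⟩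
    · rintro (h | ⟨L', hL', i, hi, h2⟩)
      · exact Or.inl (Or.inl h)
      · rcases List.mem_cons.mp hL' with rfl | hL''
        · exact Or.inl (Or.inr ⟨i, hi, h2⟩)
        · exact Or.inr ⟨L', hL'', i, hi, h2⟩

-- every slice the index stores is a substring of the text
theorem pv_slice_isIn (text : String) (L i : Int) (hL : 0 ≤ L)
    (hi : i ∈ PySem.List.pyRange 0 (PySem.Str.len text - L + 1) 1) :
    PySem.Str.isIn (PySem.Str.slice text (some i) (some (i + L))) text = true := by
  rw [PySem.List.mem_pyRange_one] at hi
  rw [PySem.Str.isIn_iff_infix, PySem.Str.toList_slice, PySem.Chars.slice_eq_listSlice,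
    PySem.List.slice_toNat _ hi.1 (by omega)]
  exact (List.take_prefix _ _).isInfix.trans (List.drop_suffix _ _).isInfix

-- every substring of the text appears as one of the stored slices of its own length
theorem pv_isIn_slice (text t : String) (h : PySem.Str.isIn t text = true) :
    ∃ i ∈ PySem.List.pyRange 0 (PySem.Str.len text - PySem.Str.len t + 1) 1,
      t = PySem.Str.slice text (some i) (some (i + PySem.Str.len t)) := by
  rw [PySem.Str.isIn_iff_infix] at h
  obtain ⟨u, v, huv⟩ := h
  have hlen : text.toList.length = u.length + t.toList.length + v.length := by
    rw [← huv]; simp; omega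
  refine ⟨(u.length : Int), ?_, ?_⟩
  · rw [PySem.List.mem_pyRange_one]
    constructor
    · exact_mod_cast Nat.zero_le _
    · simp only [PySem.Str.len_eq]; omega
  · rw [← String.toList_inj, PySem.Str.toList_slice, PySem.Chars.slice_eq_listSlice,
      PySem.Str.len_eq, PySem.List.slice_toNat _ (by omega) (by omega)]
    have h1 : (((u.length : Int)) + (t.toList.length : Int)).toNat = u.length + t.toList.length := by
      omega
    have h2 : ((u.length : Int)).toNat = u.length := by omega
    rw [h1, h2, Nat.add_sub_cancel_left, ← huv, List.append_assoc, List.drop_left, List.take_left]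

-- every stored length is nonnegative
theorem pv_fgrLengths_nonneg (g : List (String × String)) (L : Int) (hL : L ∈ fgrLengths g) : 0 ≤ L := by
  unfold fgrLengths at hL
  rw [pv_mem_fgrLengths] at hL
  rcases hL with h | ⟨p, _, _, rfl⟩
  · simp [PySem.Set.empty] at h
  · rw [PySem.Str.len_eq]; exact_mod_cast Nat.zero_le _

-- the index lookup agrees with Python's 'term in text' for every term whose length is indexed
theorem pv_contains_eq (g : List (String × String)) (text t : String)
    (hmem : PySem.Str.len t ∈ fgrLengths g) :
    PySem.Set.contains (fgrSubs text (fgrLengths g)) t = PySem.Str.isIn t text := by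
  cases hIn : PySem.Str.isIn t text with
  | true =>
    obtain ⟨i, hi, ht⟩ := pv_isIn_slice text t hIn
    rw [PySem.Set.contains_iff]
    unfold fgrSubs
    rw [pv_mem_fgrSubs]
    exact Or.inr ⟨PySem.Str.len t, hmem, i, hi, ht⟩
  | false =>
    cases hc : PySem.Set.contains (fgrSubs text (fgrLengths g)) t with
    | false => rfl
    | true =>
      exfalso
      rw [PySem.Set.contains_iff] at hc
      unfold fgrSubs at hc
      rw [pv_mem_fgrSubs] at hc
      rcases hc with h | ⟨L, hLmem, i, hi, rfl⟩
      · simp [PySem.Set.empty] at h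
      · have := pv_slice_isIn text L i (pv_fgrLengths_nonneg g L hLmem) hi
        rw [hIn] at this
        exact Bool.false_ne_true this

-- ===== VERDICT (by name: the statement is the Claim_ definition above) =====
theorem find_glossary_regressions_spec : Claim_equal_find_glossary_regressions := by
  intro o im g _
  unfold Spec_find_glossary_regressions
  by_cases hg : g = []
  · subst hg; rfl
  · have hcond : ∀ p ∈ g,
        (!(p.2 == "") && (PySem.Set.contains (fgrSubs o (fgrLengths g)) p.2 &&
          !PySem.Set.contains (fgrSubs im (fgrLengths g)) p.2)) =
        (!(p.2 == "") && (PySem.Str.isIn p.2 o && !PySem.Str.isIn p.2 im)) := by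
      intro p hp
      by_cases hp2 : p.2 = ""
      · simp [hp2]
      · have hmem : PySem.Str.len p.2 ∈ fgrLengths g := by
          unfold fgrLengths
          rw [pv_mem_fgrLengths]
          exact Or.inr ⟨p, hp, hp2, rfl⟩
        rw [pv_contains_eq g o p.2 hmem, pv_contains_eq g im p.2 hmem]
    have hfold : List.foldl (fun (regressions : List (List (String × String))) (p : String × String) =>
        if p.2 = "" then regressions
        else if PySem.Str.isIn p.2 o && !PySem.Str.isIn p.2 im then regressions ++ [pvEntry p.1 p.2]
        else regressions) [] g
      = List.foldl (fun (acc : List (List (String × String))) (p : String × String) =>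
        if (!(p.2 == "") && (PySem.Str.isIn p.2 o && !PySem.Str.isIn p.2 im))
        then acc ++ [pvEntry p.1 p.2] else acc) [] g := by
      apply PySem.List.foldl_congr_mem
      intro acc p _
      by_cases hp : p.2 = "" <;> simp [hp]
    unfold find_glossary_regressions
    rw [if_neg hg]
    show List.foldl (fun regressions p =>
        if p.2 = "" then regressions
        else if PySem.Str.isIn p.2 o && !PySem.Str.isIn p.2 im then regressions ++ [pvEntry p.1 p.2]
        else regressions) [] g = _
    rw [hfold, PySem.List.foldl_append_if, List.nil_append]
    simp only [find_glossary_regressions_alt]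
    rw [List.filter_congr hcond]
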